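-- pv_equiv track=rewrite | github.com/pm4py/pm4py-core | pm4py/algo/discovery/inductive/variants/im_clean/cuts/loop.py | _check_end_completeness
-- ===== SOURCE A (Python) =====
-- def _check_end_completeness(dfg, start_activities, end_activities, groups):
--     i = 1
--     while i < len(groups):
--         merge = False
--         for a in groups[i]:
--             if merge:
--                 break
--             for (b, x) in dfg:
--                 if x == a and b in end_activities:
--                     for e in end_activities:
--                         if not (e, a) in dfg:
--                             merge = True
--         if merge:
--             groups[0] = groups[0].union(groups[i])
--             del groups[i]
--             continue
--         i = i + 1
--     return groups
-- ===== SOURCE B (Python) =====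
-- def _check_end_completeness(dfg, start_activities, end_activities, groups):
--     ends = set(end_activities)
--     keys = set(dfg)
--     triggers = {x for (b, x) in dfg
--                 if b in ends and any((e, x) not in keys for e in ends)}
--     if not groups:
--         return []
--     merged = groups[0]
--     kept = []
--     for g in groups[1:]:
--         if any(a in triggers for a in g):
--             merged = merged.union(g)
--         else:
--             kept.append(g)
--     return [merged] + kept
-- ===== Notes on version B (the rewrite author's own statement) =====
-- stated objective: faster
-- what changed: B precomputes the set of triggering activities (targets of an edge from an end activity that lack some edge from an end activity) once from the DFG, then makes a single pass over the groups, instead of A's while-loop that rescans the DFG and end activities for every activity of every group and deletes groups in place.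
import Mathlib
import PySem

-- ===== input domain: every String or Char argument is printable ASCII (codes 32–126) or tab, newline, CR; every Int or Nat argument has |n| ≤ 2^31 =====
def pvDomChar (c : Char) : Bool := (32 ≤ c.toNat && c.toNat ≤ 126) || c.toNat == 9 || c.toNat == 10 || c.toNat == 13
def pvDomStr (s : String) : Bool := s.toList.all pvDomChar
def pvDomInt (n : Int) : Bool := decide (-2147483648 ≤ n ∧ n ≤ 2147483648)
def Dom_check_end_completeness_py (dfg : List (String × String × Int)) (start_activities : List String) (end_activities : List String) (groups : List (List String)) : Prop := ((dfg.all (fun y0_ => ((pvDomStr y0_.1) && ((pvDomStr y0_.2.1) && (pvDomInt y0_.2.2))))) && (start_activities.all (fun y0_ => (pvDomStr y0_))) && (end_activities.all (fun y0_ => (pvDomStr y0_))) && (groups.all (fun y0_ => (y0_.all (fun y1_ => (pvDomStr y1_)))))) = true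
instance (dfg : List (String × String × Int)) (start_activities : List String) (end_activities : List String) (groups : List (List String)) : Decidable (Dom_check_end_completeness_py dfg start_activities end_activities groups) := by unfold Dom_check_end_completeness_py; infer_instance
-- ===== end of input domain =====

-- B replaces A's quadratic rescan loop by precomputing the set of "triggering" activities once
-- and making a single pass over the groups (objective: faster). Equivalence is about the RETURN
-- value only: Python A mutates `groups` in place, B builds a fresh list.

-- ===== PORT A =====
-- inner `for e in end_activities: if not (e, a) in dfg: merge = True`
def pvInnerE (dfg : List (String × String × Int)) (end_activities : List String) (a : String) (m : Bool) : Bool :=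
  end_activities.foldl (fun m2 e => if !(dfg.any (fun u => u.1 == e && u.2.1 == a)) then true else m2) m

-- `merge = False; for a in groups[i]: if merge: break; for (b,x) in dfg: if x == a and b in end_activities: <inner>`
def pvMergeFlag (dfg : List (String × String × Int)) (end_activities : List String) (g : List String) : Bool :=
  g.foldl (fun merge a =>
    if merge then merge
    else dfg.foldl (fun m t =>
      if t.2.1 == a && end_activities.contains t.1 then pvInnerE dfg end_activities a m else m) merge) false

-- the `while i < len(groups)` loop with `del groups[i]` / `i += 1`
def pvLoopA (dfg : List (String × String × Int)) (end_activities : List String) (groups : List (List String)) (i : Nat) : List (List String) :=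
  if h : i < groups.length then
    if pvMergeFlag dfg end_activities groups[i] then
      pvLoopA dfg end_activities ((groups.set 0 (PySem.Set.union (groups.getD 0 []) groups[i])).eraseIdx i) i
    else pvLoopA dfg end_activities groups (i+1)
  else groups
termination_by groups.length - i
decreasing_by
  · simp [List.length_eraseIdx, h]; omega
  · omega

def check_end_completeness_py (dfg : List (String × String × Int)) (start_activities : List String) (end_activities : List String) (groups : List (List String)) : List (List String) :=
  pvLoopA dfg end_activities groups 1

-- ===== PORT B =====
def check_end_completeness_py_alt (dfg : List (String × String × Int)) (start_activities : List String) (end_activities : List String) (groups : List (List String)) : List (List String) :=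
  let ends := PySem.Set.ofList end_activities
  let keys := PySem.Set.ofList (dfg.map (fun t => (t.1, t.2.1)))
  let triggers := PySem.Set.ofList ((dfg.filter (fun t =>
      PySem.Set.contains ends t.1 && ends.any (fun e => !(PySem.Set.contains keys (e, t.2.1))))).map (fun t => t.2.1))
  match groups with
  | [] => []
  | g0 :: rest =>
    let p := rest.foldl (fun (acc : List String × List (List String)) g =>
        if g.any (fun a => PySem.Set.contains triggers a) then (PySem.Set.union acc.1 g, acc.2)
        else (acc.1, acc.2 ++ [g])) (g0, ([] : List (List String)))
    p.1 :: p.2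

-- ===== PRECONDITION & SPEC =====
def Spec_check_end_completeness_py (dfg : List (String × String × Int)) (start_activities : List String) (end_activities : List String) (groups : List (List String)) (out : List (List String)) : Prop := out = check_end_completeness_py_alt dfg start_activities end_activities groups
instance (dfg : List (String × String × Int)) (start_activities : List String) (end_activities : List String) (groups : List (List String)) (out : List (List String)) : Decidable (Spec_check_end_completeness_py dfg start_activities end_activities groups out) := by unfold Spec_check_end_completeness_py; infer_instance

-- ===== CLAIM (what is proved, stated in full; the proofs are below) =====
def Claim_equal_check_end_completeness_py : Prop := ∀ (dfg : List (String × String × Int)) (start_activities : List String) (end_activities : List String) (groups : List (List String)), Dom_check_end_completeness_py dfg start_activities end_activities groups → Spec_check_end_completeness_py dfg start_activities end_activities groups (check_end_completeness_py dfg start_activities end_activities groups)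

-- ===== LEMMAS AND PROOFS =====

-- the per-activity trigger condition, as A computes it
def trigA (dfg : List (String × String × Int)) (ea : List String) (a : String) : Bool :=
  dfg.any (fun t => t.2.1 == a && ea.contains t.1) &&
  ea.any (fun e => !(dfg.any (fun u => u.1 == e && u.2.1 == a)))

theorem pvInnerE_eq (dfg : List (String × String × Int)) (ea : List String) (a : String) :
    ∀ m, pvInnerE dfg ea a m = (m || ea.any (fun e => !(dfg.any (fun u => u.1 == e && u.2.1 == a)))) := by
  induction ea with
  | nil => intro m; simp [pvInnerE]
  | cons e es ih =>
    intro m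
    have h := ih (if !(dfg.any (fun u => u.1 == e && u.2.1 == a)) then true else m)
    simp only [pvInnerE, List.foldl_cons] at h ⊢
    rw [h, List.any_cons]
    cases hm : (dfg.any (fun u => u.1 == e && u.2.1 == a)) <;> cases m <;> simp

theorem pvFoldDfg_eq (dfg : List (String × String × Int)) (ea : List String) (a : String) :
    ∀ (l : List (String × String × Int)) (m : Bool),
      l.foldl (fun m t => if t.2.1 == a && ea.contains t.1 then pvInnerE dfg ea a m else m) m
      = (m || (l.any (fun t => t.2.1 == a && ea.contains t.1) &&
               ea.any (fun e => !(dfg.any (fun u => u.1 == e && u.2.1 == a))))) := by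
  intro l
  induction l with
  | nil => intro m; simp
  | cons t l ih =>
    intro m
    simp only [List.foldl_cons, List.any_cons]
    by_cases h : (t.2.1 == a && ea.contains t.1) = true
    · rw [if_pos h, h, pvInnerE_eq, ih]
      cases m <;> cases hk : ea.any (fun e => !(dfg.any (fun u => u.1 == e && u.2.1 == a))) <;>
        simp
    · rw [if_neg h, ih]
      rw [Bool.not_eq_true] at h
      rw [h]
      simp

theorem pvMergeFlagAux (dfg : List (String × String × Int)) (ea : List String) :
    ∀ (g : List String) (b : Bool),
      g.foldl (fun merge a =>
        if merge then merge
        else dfg.foldl (fun m t =>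
          if t.2.1 == a && ea.contains t.1 then pvInnerE dfg ea a m else m) merge) b
      = (b || g.any (trigA dfg ea)) := by
  intro g
  induction g with
  | nil => intro b; simp
  | cons a g ih =>
    intro b
    simp only [List.foldl_cons, List.any_cons]
    cases b with
    | true => rw [if_pos rfl, ih]; simp
    | false =>
      simp only [if_neg (by simp : ¬ (false = true))]
      rw [pvFoldDfg_eq, ih]
      simp [trigA]

theorem pvMergeFlag_eq (dfg : List (String × String × Int)) (ea : List String) (g : List String) :
    pvMergeFlag dfg ea g = g.any (trigA dfg ea) := by
  rw [pvMergeFlag, pvMergeFlagAux]; simp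

theorem trigA_eq_contains (dfg : List (String × String × Int)) (ea : List String) (a : String) :
    trigA dfg ea a =
      PySem.Set.contains (PySem.Set.ofList ((dfg.filter (fun t =>
        PySem.Set.contains (PySem.Set.ofList ea) t.1 && (PySem.Set.ofList ea).any (fun e =>
          !(PySem.Set.contains (PySem.Set.ofList (dfg.map (fun t => (t.1, t.2.1)))) (e, t.2.1))))).map (fun t => t.2.1))) a := by
  rw [Bool.eq_iff_iff]
  simp only [trigA, PySem.Set.contains, List.contains_eq_mem, Bool.and_eq_true, List.any_eq_true,
    decide_eq_true_eq, beq_iff_eq, Bool.not_eq_true', decide_eq_false_iff_not,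
    PySem.Set.mem_ofList, List.mem_map, List.mem_filter, Prod.mk.injEq, not_exists, not_and,
    List.any_eq_false]
  constructor
  · rintro ⟨⟨t, ht, hta, htin⟩, e, he, hne⟩
    exact ⟨t, ⟨ht, htin, e, he, fun u hu h1 => by rw [hta]; exact hne u hu h1⟩, hta⟩
  · rintro ⟨t, ⟨ht, htin, e, he, hne⟩, hta⟩
    exact ⟨⟨t, ht, hta, htin⟩, e, he, fun u hu h1 => by rw [← hta]; exact hne u hu h1⟩

theorem erase_mid {α : Type} : ∀ (kept : List α) (g : α) (rest : List α),
    (kept ++ g :: rest).eraseIdx kept.length = kept ++ rest := by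
  intro kept g rest
  induction kept with
  | nil => rfl
  | cons x xs ih => simpa using ih

theorem pvLoopA_eq (dfg : List (String × String × Int)) (ea : List String) :
    ∀ (rest kept : List (List String)) (g0 : List String),
      pvLoopA dfg ea (g0 :: (kept ++ rest)) (kept.length + 1) =
        (let p := rest.foldl (fun (acc : List String × List (List String)) g =>
            if g.any (trigA dfg ea) then (PySem.Set.union acc.1 g, acc.2)
            else (acc.1, acc.2 ++ [g])) (g0, kept)
         p.1 :: p.2) := by
  intro rest
  induction rest with
  | nil =>
    intro kept g0
    rw [pvLoopA]
    simp
  | cons g rest ih =>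
    intro kept g0
    rw [pvLoopA]
    have hlt : kept.length + 1 < (g0 :: (kept ++ g :: rest)).length := by
      simp only [List.length_cons, List.length_append]; omega
    rw [dif_pos hlt]
    have hget : (g0 :: (kept ++ g :: rest))[kept.length + 1]'hlt = g := by
      simp [List.getElem_append_right (Nat.le_refl kept.length)]
    rw [hget, pvMergeFlag_eq]
    by_cases hm : g.any (trigA dfg ea) = true
    · rw [if_pos hm]
      have hre : ((g0 :: (kept ++ g :: rest)).set 0
          (PySem.Set.union ((g0 :: (kept ++ g :: rest)).getD 0 []) g)).eraseIdx (kept.length + 1)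
          = (PySem.Set.union g0 g) :: (kept ++ rest) := by
        simp [List.eraseIdx_cons_succ, erase_mid]
      rw [hre, ih kept (PySem.Set.union g0 g)]
      simp only [List.foldl_cons, hm, if_true]
    · rw [if_neg hm]
      have h2 : g0 :: (kept ++ g :: rest) = g0 :: ((kept ++ [g]) ++ rest) := by simp
      have h3 : kept.length + 1 + 1 = (kept ++ [g]).length + 1 := by simp
      rw [h2, h3, ih (kept ++ [g]) g0]
      simp only [List.foldl_cons, if_neg hm]

-- ===== VERDICT (by name: the statement is the Claim_ definition above) =====
theorem check_end_completeness_py_spec : Claim_equal_check_end_completeness_py := by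
  intro dfg sa ea groups _
  unfold Spec_check_end_completeness_py check_end_completeness_py check_end_completeness_py_alt
  cases groups with
  | nil => simp [pvLoopA]
  | cons g0 rest =>
    have h := pvLoopA_eq dfg ea rest [] g0
    simp only [List.nil_append, List.length_nil] at h
    simp only []
    rw [h]
    have hstep : (fun (acc : List String × List (List String)) g =>
        if g.any (trigA dfg ea) then (PySem.Set.union acc.1 g, acc.2)
        else (acc.1, acc.2 ++ [g])) =
      (fun (acc : List String × List (List String)) g =>
        if g.any (fun a => PySem.Set.contains (PySem.Set.ofList ((dfg.filter (fun t =>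
          PySem.Set.contains (PySem.Set.ofList ea) t.1 && (PySem.Set.ofList ea).any (fun e =>
            !(PySem.Set.contains (PySem.Set.ofList (dfg.map (fun t => (t.1, t.2.1)))) (e, t.2.1))))).map (fun t => t.2.1))) a)
        then (PySem.Set.union acc.1 g, acc.2)
        else (acc.1, acc.2 ++ [g])) := by
      funext acc g
      congr 1
      rw [funext (trigA_eq_contains dfg ea)]
    rw [hstep]
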